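-- pv_equiv track=rewrite | github.com/kevzhang/neuralnet | xo/training_data.py | duplicate_and_shift
-- ===== SOURCE A (Python) =====
-- import copy, random
--
-- width = 8
--
-- height = 8
--
-- def duplicate_and_shift(image, result):
--     img_height = len(image)
--     img_width = len(image[0])
--     heightD = height - img_height
--     widthD = width - img_width
--     shifted = []
--     for row_offset in range(heightD + 1):
--         for col_offset in range(widthD + 1):
--             right_cols = width - img_width - col_offset
--             bot_rows = height - img_height - row_offset
--             shifted_image = copy.copy(image)
--             # fill with left and right columns
--             for imgR in range(len(shifted_image)):
--                 shifted_image[imgR] = col_offset * '.' + shifted_image[imgR] + right_cols * '.'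
--             shifted_image = row_offset * ['.' * width] + shifted_image + bot_rows * ['.' * width]
--             shifted.append((shifted_image, result))
--     return shifted
-- ===== SOURCE B (Python) =====
-- width = 8
--
-- height = 8
--
-- def duplicate_and_shift(image, result):
--     # Build one canonical grid (image anchored top-left, padded with dots to
--     # width x height); every placement is a pure rotation of that grid:
--     # vertical shift = rotate the row list, horizontal shift = rotate each row
--     # string (the padding being dots makes rotation equal to re-padding).
--     hD = height - len(image)
--     wD = width - len(image[0])
--     grid = [row + '.' * wD for row in image] + ['.' * width] * hD
--     n = len(grid)
--     out = []
--     for r in range(hD + 1):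
--         g = grid[n - r:] + grid[:n - r]
--         for c in range(wD + 1):
--             out.append(([s[len(s) - c:] + s[:len(s) - c] for s in g], result))
--     return out
-- ===== Notes on version B (the rewrite author's own statement) =====
-- stated objective: alternative
-- what changed: B builds one canonical 8x8 grid (image anchored top-left, dot padding) and derives every placement by rotation — slicing the row list to rotate vertically and rotating each row string for the horizontal shift — instead of re-padding every row with computed dot counts inside the nested loops; correctness rests on the padding being dots, so the rotated-in suffix equals the new left padding.
import Mathlib
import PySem

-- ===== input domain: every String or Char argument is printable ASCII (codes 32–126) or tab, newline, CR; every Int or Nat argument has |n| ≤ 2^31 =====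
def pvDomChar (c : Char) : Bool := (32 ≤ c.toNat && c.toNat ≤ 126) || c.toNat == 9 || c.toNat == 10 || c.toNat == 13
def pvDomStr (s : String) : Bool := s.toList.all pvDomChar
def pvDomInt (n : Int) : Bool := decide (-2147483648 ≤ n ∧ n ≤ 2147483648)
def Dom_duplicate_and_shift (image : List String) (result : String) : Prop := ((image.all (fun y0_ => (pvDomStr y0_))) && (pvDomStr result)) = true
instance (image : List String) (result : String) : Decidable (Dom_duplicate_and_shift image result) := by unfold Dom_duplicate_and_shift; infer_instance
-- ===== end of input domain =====

-- B builds one canonical grid (image anchored top-left, dot padding) and derives every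
-- placement by ROTATING that grid (row-list rotation for vertical shifts, per-row string
-- rotation for horizontal ones) instead of re-padding each row per placement (objective: alternative).

-- n * '.' in Python (empty string for n ≤ 0)
def pyRepDot (n : Int) : String := String.ofList (List.replicate n.toNat '.')

-- ===== PORT A =====
def duplicate_and_shift (image : List String) (result : String) : List (List String × String) :=
  let img_height : Int := image.length
  let img_width : Int := PySem.Str.len (PySem.List.pyGetD image 0 "")
  let heightD : Int := 8 - img_height
  let widthD : Int := 8 - img_width
  (PySem.List.pyRange 0 (heightD + 1) 1).foldl (fun shifted row_offset =>
    (PySem.List.pyRange 0 (widthD + 1) 1).foldl (fun shifted col_offset =>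
      let right_cols : Int := 8 - img_width - col_offset
      let bot_rows : Int := 8 - img_height - row_offset
      let shifted_image := image
      let shifted_image :=
        (PySem.List.pyRange 0 (shifted_image.length : Int) 1).foldl
          (fun si imgR =>
            si.set imgR.toNat (pyRepDot col_offset ++ PySem.List.pyGetD si imgR "" ++ pyRepDot right_cols))
          shifted_image
      let shifted_image :=
        PySem.List.pyRepeat [pyRepDot 8] row_offset ++ shifted_image ++ PySem.List.pyRepeat [pyRepDot 8] bot_rows
      shifted ++ [(shifted_image, result)]) shifted) []

-- ===== PORT B =====
-- s[len(s) - c:] + s[:len(s) - c]  — string slicing/concatenation ported on the char-list side (exact)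
def pyRotStr (s : String) (c : Int) : String :=
  String.ofList (PySem.List.slice s.toList (some ((s.toList.length : Int) - c)) none ++
                 PySem.List.slice s.toList none (some ((s.toList.length : Int) - c)))

def duplicate_and_shift_alt (image : List String) (result : String) : List (List String × String) :=
  let hD : Int := 8 - (image.length : Int)
  let wD : Int := 8 - PySem.Str.len (PySem.List.pyGetD image 0 "")
  let grid : List String :=
    image.map (fun row => row ++ pyRepDot wD) ++ PySem.List.pyRepeat [pyRepDot 8] hD
  let n : Int := (grid.length : Int)
  (PySem.List.pyRange 0 (hD + 1) 1).foldl (fun out r =>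
    let g := PySem.List.slice grid (some (n - r)) none ++ PySem.List.slice grid none (some (n - r))
    (PySem.List.pyRange 0 (wD + 1) 1).foldl (fun out c =>
      out ++ [(g.map (fun s => pyRotStr s c), result)]) out) []

-- ===== PRECONDITION & SPEC =====
-- Pre_ excludes only the empty image, on which A raises IndexError (image[0]).
def Pre_duplicate_and_shift (image : List String) (result : String) : Prop := image ≠ []
instance (image : List String) (result : String) : Decidable (Pre_duplicate_and_shift image result) := by unfold Pre_duplicate_and_shift; infer_instance
def pvWitness_duplicate_and_shift : List String × String := (["#"], "x")

def Spec_duplicate_and_shift (image : List String) (result : String) (out : List (List String × String)) : Prop := out = duplicate_and_shift_alt image result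
instance (image : List String) (result : String) (out : List (List String × String)) : Decidable (Spec_duplicate_and_shift image result out) := by unfold Spec_duplicate_and_shift; infer_instance

-- ===== CLAIM (what is proved, stated in full; the proofs are below) =====
def Claim_equal_duplicate_and_shift : Prop := ∀ (image : List String) (result : String), Dom_duplicate_and_shift image result → Pre_duplicate_and_shift image result → Spec_duplicate_and_shift image result (duplicate_and_shift image result)

-- ===== LEMMAS AND PROOFS =====

-- The in-place index loop 'for i in range(len(xs)): xs[i] = f(xs[i])' is List.map f.
theorem set_fold_aux (f : String → String) :
    ∀ (suf pre : List String),
      (PySem.List.pyRange (pre.length : Int) ((pre.length : Int) + (suf.length : Int)) 1).foldl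
        (fun si i => si.set i.toNat (f (PySem.List.pyGetD si i ""))) (pre ++ suf)
      = pre ++ suf.map f := by
  intro suf
  induction suf with
  | nil =>
      intro pre
      rw [PySem.List.pyRange_one_eq_nil (by simp)]
      simp
  | cons p ps ih =>
      intro pre
      rw [PySem.List.pyRange_one_cons (by simp only [List.length_cons]; push_cast; omega)]
      simp only [List.foldl_cons]
      have hget : PySem.List.pyGetD (pre ++ p :: ps) (pre.length : Int) "" = p := by
        rw [PySem.List.pyGetD_natCast]
        simp [List.getD_eq_getElem?_getD]
      have hset : (pre ++ p :: ps).set ((pre.length : Int)).toNat (f p) = (pre ++ [f p]) ++ ps := by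
        simp
      rw [hget, hset]
      have h1 : (pre.length : Int) + 1 = ((pre ++ [f p]).length : Int) := by simp
      have h2 : (pre.length : Int) + ((p :: ps).length : Int) = ((pre ++ [f p]).length : Int) + (ps.length : Int) := by
        simp; omega
      rw [h1, h2, ih (pre ++ [f p])]
      simp

theorem set_fold (f : String → String) (xs : List String) :
    (PySem.List.pyRange 0 (xs.length : Int) 1).foldl
      (fun si i => si.set i.toNat (f (PySem.List.pyGetD si i ""))) xs
    = xs.map f := by
  have := set_fold_aux f xs []
  simpa using this

-- Rotating a right-dot-padded row by c ≤ wD re-pads it: the last c chars are dots.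
theorem rot_padded (row : String) (wD c : Int) (h0 : 0 ≤ c) (h1 : c ≤ wD) :
    pyRotStr (row ++ pyRepDot wD) c = pyRepDot c ++ row ++ pyRepDot (wD - c) := by
  unfold pyRotStr pyRepDot
  have hc : c.toNat ≤ wD.toNat := by omega
  have htl : (row ++ String.ofList (List.replicate wD.toNat '.')).toList
      = row.toList ++ List.replicate wD.toNat '.' := by
    rw [String.toList_append]; simp
  rw [htl]
  have hlen : ((row.toList ++ List.replicate wD.toNat '.').length : Int) - c
      = ((row.toList.length + (wD.toNat - c.toNat) : Nat) : Int) := by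
    simp; omega
  rw [hlen, PySem.List.slice_from_natCast, PySem.List.slice_to_natCast]
  have hdrop : (row.toList ++ List.replicate wD.toNat '.').drop (row.toList.length + (wD.toNat - c.toNat))
      = List.replicate c.toNat '.' := by
    rw [List.drop_length_add_append]
    simp [List.drop_replicate]
    omega
  have htake : (row.toList ++ List.replicate wD.toNat '.').take (row.toList.length + (wD.toNat - c.toNat))
      = row.toList ++ List.replicate (wD.toNat - c.toNat) '.' := by
    rw [List.take_length_add_append]
    simp [List.take_replicate]
  rw [hdrop, htake]
  have : (wD - c).toNat = wD.toNat - c.toNat := by omega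
  rw [this]
  simp [String.ofList_append, String.ofList_toList, String.append_assoc]

-- Rotating the all-dots row is the identity.
theorem rot_blank (c : Int) (h0 : 0 ≤ c) (h1 : c ≤ 8) :
    pyRotStr (pyRepDot 8) c = pyRepDot 8 := by
  have h : pyRepDot 8 = ("" : String) ++ pyRepDot 8 := by simp [pyRepDot]
  rw [h, rot_padded "" 8 c h0 h1]
  have h2 : pyRepDot c ++ "" ++ pyRepDot (8 - c)
      = String.ofList (List.replicate (c.toNat + (8 - c).toNat) '.') := by
    simp [pyRepDot, List.replicate_add, ← String.ofList_append,
      -List.replicate_append_replicate]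
  have hn : c.toNat + (8 - c).toNat = ((8 : Int)).toNat := by omega
  rw [h2, hn]
  rfl

-- Rotating the canonical grid's row list by r ≤ hD brings r blank rows to the top.
theorem rot_grid (padded : List String) (hD r : Int) (h0 : 0 ≤ r) (h1 : r ≤ hD) :
    PySem.List.slice (padded ++ PySem.List.pyRepeat [pyRepDot 8] hD)
        (some (((padded ++ PySem.List.pyRepeat [pyRepDot 8] hD).length : Int) - r)) none ++
      PySem.List.slice (padded ++ PySem.List.pyRepeat [pyRepDot 8] hD)
        none (some (((padded ++ PySem.List.pyRepeat [pyRepDot 8] hD).length : Int) - r))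
    = PySem.List.pyRepeat [pyRepDot 8] r ++ padded ++ PySem.List.pyRepeat [pyRepDot 8] (hD - r) := by
  have hrep : ∀ m : Int, PySem.List.pyRepeat [pyRepDot 8] m = List.replicate m.toNat (pyRepDot 8) := by
    intro m
    simp [PySem.List.pyRepeat, List.flatten_replicate_singleton]
  rw [hrep hD, hrep r, hrep (hD - r)]
  set L := padded ++ List.replicate hD.toNat (pyRepDot 8) with hL
  have hlen : ((L.length : Int) - r) = ((padded.length + (hD.toNat - r.toNat) : Nat) : Int) := by
    simp [hL]; omega
  rw [hlen, PySem.List.slice_from_natCast, PySem.List.slice_to_natCast]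
  have hdrop : L.drop (padded.length + (hD.toNat - r.toNat)) = List.replicate r.toNat (pyRepDot 8) := by
    rw [hL, List.drop_length_add_append]
    simp [List.drop_replicate]
    omega
  have htake : L.take (padded.length + (hD.toNat - r.toNat))
      = padded ++ List.replicate (hD.toNat - r.toNat) (pyRepDot 8) := by
    rw [hL, List.take_length_add_append]
    simp [List.take_replicate]
  rw [hdrop, htake]
  have : (hD - r).toNat = hD.toNat - r.toNat := by omega
  rw [this, List.append_assoc]

-- ===== VERDICT (by name: the statement is the Claim_ definition above) =====
theorem duplicate_and_shift_spec : Claim_equal_duplicate_and_shift := by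
  intro image result _ _
  unfold Spec_duplicate_and_shift duplicate_and_shift duplicate_and_shift_alt
  simp only []
  set iw : Int := PySem.Str.len (PySem.List.pyGetD image 0 "") with hiw
  have hiw0 : 0 ≤ iw := by rw [hiw]; simp [PySem.Str.len_eq]
  set ih : Int := (image.length : Int) with hih
  have hA :
    (PySem.List.pyRange 0 (8 - ih + 1) 1).foldl (fun shifted row_offset =>
      (PySem.List.pyRange 0 (8 - iw + 1) 1).foldl (fun shifted col_offset =>
        shifted ++ [(PySem.List.pyRepeat [pyRepDot 8] row_offset ++
            ((PySem.List.pyRange 0 (image.length : Int) 1).foldl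
              (fun si imgR => si.set imgR.toNat (pyRepDot col_offset ++ PySem.List.pyGetD si imgR "" ++ pyRepDot (8 - iw - col_offset))) image) ++
            PySem.List.pyRepeat [pyRepDot 8] (8 - ih - row_offset), result)]) shifted) []
      = (PySem.List.pyRange 0 (8 - ih + 1) 1).foldl (fun shifted row_offset =>
          (PySem.List.pyRange 0 (8 - iw + 1) 1).foldl (fun shifted col_offset =>
            shifted ++ [(PySem.List.pyRepeat [pyRepDot 8] row_offset ++
                image.map (fun row => pyRepDot col_offset ++ row ++ pyRepDot (8 - iw - col_offset)) ++
                PySem.List.pyRepeat [pyRepDot 8] (8 - ih - row_offset), result)]) shifted) [] := by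
    apply PySem.List.foldl_congr_mem
    intro acc r _
    apply PySem.List.foldl_congr_mem
    intro acc' c _
    rw [set_fold (fun row => pyRepDot c ++ row ++ pyRepDot (8 - iw - c)) image]
  rw [hA]
  -- B side: rewrite each placement to A's shape, pointwise over both ranges.
  apply Eq.symm
  apply PySem.List.foldl_congr_mem
  intro acc r hr
  rw [PySem.List.mem_pyRange_one] at hr
  have hrot := rot_grid (image.map (fun row => row ++ pyRepDot (8 - iw))) (8 - ih) r hr.1 (by omega)
  rw [hrot]
  apply PySem.List.foldl_congr_mem
  intro acc' c hc
  rw [PySem.List.mem_pyRange_one] at hc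
  have hc1 : c ≤ 8 - iw := by omega
  congr 2
  rw [List.map_append, List.map_append, List.map_map]
  have hblank : ∀ m : Int, (PySem.List.pyRepeat [pyRepDot 8] m).map (fun s => pyRotStr s c)
      = PySem.List.pyRepeat [pyRepDot 8] m := by
    intro m
    have : ∀ s ∈ PySem.List.pyRepeat [pyRepDot 8] m, pyRotStr s c = s := by
      intro s hs
      have : s = pyRepDot 8 := by
        simp [PySem.List.pyRepeat, List.flatten_replicate_singleton] at hs
        exact hs.2
      rw [this, rot_blank c hc.1 (by omega)]
    calc (PySem.List.pyRepeat [pyRepDot 8] m).map (fun s => pyRotStr s c)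
        = (PySem.List.pyRepeat [pyRepDot 8] m).map id := List.map_congr_left this
      _ = _ := List.map_id _
  rw [hblank, hblank]
  congr 1
  congr 1
  congr 1
  apply List.map_congr_left
  intro row _
  exact rot_padded row (8 - iw) c hc.1 hc1
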